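-- pv_equiv track=rewrite | github.com/sing-kuro/Plover_Japanese_Chimedori | Plover_Japanese_Chimedori/dictionaries/chimedori_romaji.py | reverse_translate
-- ===== SOURCE A (Python) =====
-- def reverse_translate(texts):
--     results = []
--     results.append(find_keys(texts[0], consonant_dict))
--     results.append(find_keys(texts[1], vowel1_dict))
--     results.append(find_keys(texts[2], vowel2_dict))
--     results.append(find_keys(texts[3], suffix_dict))
--     result = []
--     for c in results[0]:
--         for v1 in results[1]:
--             for v2 in results[2]:
--                 for suf in results[3]:
--                     result.append(c + v1 + v2 + suf)
--     return result
--
-- def find_keys(text, dictionary):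
--     if text is None or text == "":
--         return [""]
--     return [key for key, value in dictionary.items() if value == text]
--
-- consonant_dict = {
--     "": "",
--     "K": "k",
--     "S": "s",
--     "T": "t",
--     "N": "n",
--     "SK": "r",
--     "TK": "m",
--     "NT": "d",
--     "NS": "h",
--     "NK": "g",
--     "ST": "ts",
--     "STK": "z",
--     "NTK": "w",
--     "NSK": "b",
--     "NST": "p",
--     "NSTK": "x",
-- }
--
-- vowel1_dict = {
--     "": "",
--     "U": "u",
--     "I": "i",
--     "O": "o",
--     "A": "a",
--     "OA": "e",
--     "UI": "yo",
--     "IA": "yu",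
--     "UO": "ya",
-- }
--
-- vowel2_dict = {
--     "": "",
--     "a": "a",
--     "i": "i",
--     "ua": "u",
--     "ei": "e",
--     "ai": "o",
-- }
--
-- suffix_dict = {
--     "": "",
--     "ん": "nn",
--     "し": "si",
--     "ー": "-",
--     "っ": "xtsu",
--     "んし": "nnsi",
--     "ーっ": "sinn",
--     "んー": "ssi",
--     "しっ": "sixtsu",
--     "んしーっ": "si-",
-- }
-- ===== SOURCE B (Python) =====
-- def reverse_translate(texts):
--     parts = [_keys_for(texts[0], _rev_consonant),
--              _keys_for(texts[1], _rev_vowel1),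
--              _keys_for(texts[2], _rev_vowel2),
--              _keys_for(texts[3], _rev_suffix)]
--     return _cart(parts)
--
--
-- def _cart(lists):
--     # cartesian concatenation by recursion on the list of parts
--     if not lists:
--         return [""]
--     tails = _cart(lists[1:])
--     return [x + t for x in lists[0] for t in tails]
--
--
-- def _keys_for(text, rev):
--     if text is None or text == "":
--         return [""]
--     return rev.get(text, [])
--
--
-- def _reverse_index(d):
--     rev = {}
--     for k, v in d.items():
--         rev[v] = rev.get(v, []) + [k]
--     return rev
--
--
-- consonant_dict = {
--     "": "", "K": "k", "S": "s", "T": "t", "N": "n", "SK": "r", "TK": "m",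
--     "NT": "d", "NS": "h", "NK": "g", "ST": "ts", "STK": "z", "NTK": "w",
--     "NSK": "b", "NST": "p", "NSTK": "x",
-- }
-- vowel1_dict = {
--     "": "", "U": "u", "I": "i", "O": "o", "A": "a", "OA": "e", "UI": "yo",
--     "IA": "yu", "UO": "ya",
-- }
-- vowel2_dict = {
--     "": "", "a": "a", "i": "i", "ua": "u", "ei": "e", "ai": "o",
-- }
-- suffix_dict = {
--     "": "", "ん": "nn", "し": "si", "ー": "-", "っ": "xtsu", "んし": "nnsi",
--     "ーっ": "sinn", "んー": "ssi", "しっ": "sixtsu", "んしーっ": "si-",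
-- }
--
-- _rev_consonant = _reverse_index(consonant_dict)
-- _rev_vowel1 = _reverse_index(vowel1_dict)
-- _rev_vowel2 = _reverse_index(vowel2_dict)
-- _rev_suffix = _reverse_index(suffix_dict)
-- ===== Notes on version B (the rewrite author's own statement) =====
-- stated objective: alternative
-- what changed: B precomputes reverse indexes (value -> list of keys) once so each lookup is a dict get instead of a scan of the dictionary, and builds the cartesian product by recursion on the list of the four key-lists instead of A's hardcoded four-level nested loop.
import Mathlib
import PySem

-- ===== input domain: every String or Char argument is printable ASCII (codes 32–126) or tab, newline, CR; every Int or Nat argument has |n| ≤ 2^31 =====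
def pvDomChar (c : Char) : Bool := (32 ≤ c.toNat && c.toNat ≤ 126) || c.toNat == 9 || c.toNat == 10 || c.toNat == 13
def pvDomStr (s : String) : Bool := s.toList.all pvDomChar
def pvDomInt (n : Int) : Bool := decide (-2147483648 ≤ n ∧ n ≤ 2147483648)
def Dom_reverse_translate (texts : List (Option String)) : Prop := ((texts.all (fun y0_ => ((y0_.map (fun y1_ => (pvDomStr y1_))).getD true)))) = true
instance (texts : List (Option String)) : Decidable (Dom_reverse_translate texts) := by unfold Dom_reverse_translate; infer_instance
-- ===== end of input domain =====

-- B precomputes reverse value->keys indexes and builds the product by recursion on the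
-- list of the four key-lists instead of A's per-call dictionary scans and four nested loops
-- (objective: alternative; same output proved equal).

-- shared module-level dictionaries (association lists in insertion order)
def consonantDict : List (String × String) :=
  [("", ""), ("K", "k"), ("S", "s"), ("T", "t"), ("N", "n"), ("SK", "r"), ("TK", "m"),
   ("NT", "d"), ("NS", "h"), ("NK", "g"), ("ST", "ts"), ("STK", "z"), ("NTK", "w"),
   ("NSK", "b"), ("NST", "p"), ("NSTK", "x")]

def vowel1Dict : List (String × String) :=
  [("", ""), ("U", "u"), ("I", "i"), ("O", "o"), ("A", "a"), ("OA", "e"), ("UI", "yo"),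
   ("IA", "yu"), ("UO", "ya")]

def vowel2Dict : List (String × String) :=
  [("", ""), ("a", "a"), ("i", "i"), ("ua", "u"), ("ei", "e"), ("ai", "o")]

def suffixDict : List (String × String) :=
  [("", ""), ("ん", "nn"), ("し", "si"), ("ー", "-"), ("っ", "xtsu"), ("んし", "nnsi"),
   ("ーっ", "sinn"), ("んー", "ssi"), ("しっ", "sixtsu"), ("んしーっ", "si-")]

-- ===== PORT A =====
-- find_keys (A's helper: scans the dictionary for keys whose value equals text)
def findKeys (text : Option String) (dictionary : List (String × String)) : List String :=
  match text with
  | none => [""]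
  | some t => if t = "" then [""] else (dictionary.filter (fun kv => kv.2 == t)).map (·.1)

-- texts[0..3] raise IndexError when texts has fewer than 4 elements: excluded by Pre_.
def reverse_translate (texts : List (Option String)) : List String :=
  match PySem.List.pyGet? texts 0, PySem.List.pyGet? texts 1,
        PySem.List.pyGet? texts 2, PySem.List.pyGet? texts 3 with
  | some t0, some t1, some t2, some t3 =>
      let r0 := findKeys t0 consonantDict
      let r1 := findKeys t1 vowel1Dict
      let r2 := findKeys t2 vowel2Dict
      let r3 := findKeys t3 suffixDict
      r0.flatMap (fun c =>
        r1.flatMap (fun v1 =>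
          r2.flatMap (fun v2 =>
            r3.map (fun suf => ((c ++ v1) ++ v2) ++ suf))))
  | _, _, _, _ => []  -- IndexError in Python; unreachable under Pre_

-- ===== PORT B =====
-- _reverse_index: value -> list of keys having that value (insertion order), built once
def reverseIndex (d : List (String × String)) : PySem.Dict String (List String) :=
  d.foldl (fun rev kv => rev.insert kv.2 (rev.getD kv.2 [] ++ [kv.1])) PySem.Dict.empty

def revConsonant : PySem.Dict String (List String) := reverseIndex consonantDict
def revVowel1 : PySem.Dict String (List String) := reverseIndex vowel1Dict
def revVowel2 : PySem.Dict String (List String) := reverseIndex vowel2Dict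
def revSuffix : PySem.Dict String (List String) := reverseIndex suffixDict

-- _keys_for: a single dict lookup
def keysFor (text : Option String) (rev : PySem.Dict String (List String)) : List String :=
  match text with
  | none => [""]
  | some t => if t = "" then [""] else rev.getD t []

-- _cart: cartesian concatenation by recursion on the list of parts
def cart : List (List String) → List String
  | [] => [""]
  | l :: ls => l.flatMap (fun x => (cart ls).map (fun t => x ++ t))

def reverse_translate_alt (texts : List (Option String)) : List String :=
  (((PySem.List.pyGet? texts 0).bind fun t0 =>
    (PySem.List.pyGet? texts 1).bind fun t1 =>
    (PySem.List.pyGet? texts 2).bind fun t2 =>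
    (PySem.List.pyGet? texts 3).map fun t3 =>
      cart [keysFor t0 revConsonant, keysFor t1 revVowel1,
            keysFor t2 revVowel2, keysFor t3 revSuffix]) :
      Option (List String)).getD []  -- none = IndexError in Python; unreachable under Pre_

-- ===== PRECONDITION & SPEC =====
-- Pre_ excludes exactly the inputs where texts[3] (or an earlier index) raises IndexError in A (and in B).
def Pre_reverse_translate (texts : List (Option String)) : Prop := 4 ≤ texts.length
instance (texts : List (Option String)) : Decidable (Pre_reverse_translate texts) := by
  unfold Pre_reverse_translate; infer_instance

def pvWitness_reverse_translate : List (Option String) :=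
  [some "k", some "u", some "a", some "nn"]

def Spec_reverse_translate (texts : List (Option String)) (out : List String) : Prop := out = reverse_translate_alt texts
instance (texts : List (Option String)) (out : List String) : Decidable (Spec_reverse_translate texts out) := by unfold Spec_reverse_translate; infer_instance

-- ===== CLAIM =====
def Claim_equal_reverse_translate : Prop := ∀ (texts : List (Option String)), Dom_reverse_translate texts → Pre_reverse_translate texts → Spec_reverse_translate texts (reverse_translate texts)

-- ===== LEMMAS AND PROOFS =====

-- The reverse index answers exactly what A's per-call scan computes.
theorem reverseIndex_getD_aux (l : List (String × String)) (t : String)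
    (rev0 : PySem.Dict String (List String)) :
    (l.foldl (fun rev kv => rev.insert kv.2 (rev.getD kv.2 [] ++ [kv.1])) rev0).getD t []
      = rev0.getD t [] ++ (l.filter (fun kv => kv.2 == t)).map (·.1) := by
  induction l generalizing rev0 with
  | nil => simp
  | cons kv rest ih =>
    simp only [List.foldl_cons, ih, List.filter_cons]
    rw [PySem.Dict.getD_insert]
    by_cases h : kv.2 = t
    · subst h; simp
    · simp [h, Ne.symm h, beq_iff_eq]

theorem reverseIndex_getD (d : List (String × String)) (t : String) :
    (reverseIndex d).getD t [] = (d.filter (fun kv => kv.2 == t)).map (·.1) := by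
  unfold reverseIndex
  rw [reverseIndex_getD_aux]
  simp

theorem keysFor_eq_findKeys (text : Option String) (d : List (String × String)) :
    keysFor text (reverseIndex d) = findKeys text d := by
  cases text with
  | none => rfl
  | some t =>
    simp only [keysFor, findKeys]
    split_ifs with h
    · rfl
    · exact reverseIndex_getD d t

theorem cart_four (l0 l1 l2 l3 : List String) :
    cart [l0, l1, l2, l3]
      = l0.flatMap (fun c => l1.flatMap (fun v1 => l2.flatMap (fun v2 =>
          l3.map (fun suf => ((c ++ v1) ++ v2) ++ suf)))) := by
  simp only [cart, List.map_flatMap, List.map_map]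
  refine List.flatMap_congr ?_ ; intro c _
  refine List.flatMap_congr ?_ ; intro v1 _
  refine List.flatMap_congr ?_ ; intro v2 _
  induction l3 with
  | nil => rfl
  | cons h t ih => simp_all [Function.comp, String.append_assoc]

-- ===== VERDICT =====
theorem reverse_translate_spec : Claim_equal_reverse_translate := by
  intro texts _ hpre
  unfold Spec_reverse_translate reverse_translate reverse_translate_alt
  match texts, hpre with
  | t0 :: t1 :: t2 :: t3 :: rest, _ =>
    have h0 : PySem.List.pyGet? (t0 :: t1 :: t2 :: t3 :: rest) 0 = some t0 := by
      rw [PySem.List.pyGet?_zero]; rfl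
    have h1 : PySem.List.pyGet? (t0 :: t1 :: t2 :: t3 :: rest) 1 = some t1 := by
      rw [(by norm_num : (1 : Int) = ((1 : Nat) : Int)), PySem.List.pyGet?_natCast]; rfl
    have h2 : PySem.List.pyGet? (t0 :: t1 :: t2 :: t3 :: rest) 2 = some t2 := by
      rw [(by norm_num : (2 : Int) = ((2 : Nat) : Int)), PySem.List.pyGet?_natCast]; rfl
    have h3 : PySem.List.pyGet? (t0 :: t1 :: t2 :: t3 :: rest) 3 = some t3 := by
      rw [(by norm_num : (3 : Int) = ((3 : Nat) : Int)), PySem.List.pyGet?_natCast]; rfl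
    simp only [h0, h1, h2, h3, Option.bind_some, Option.map_some, Option.getD_some]
    rw [show revConsonant = reverseIndex consonantDict from rfl,
        show revVowel1 = reverseIndex vowel1Dict from rfl,
        show revVowel2 = reverseIndex vowel2Dict from rfl,
        show revSuffix = reverseIndex suffixDict from rfl,
        keysFor_eq_findKeys, keysFor_eq_findKeys, keysFor_eq_findKeys, keysFor_eq_findKeys,
        cart_four]
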